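-- pv_equiv track=rewrite | github.com/PopkovG/BMSTU_WORK | AISD_IU10-37/Labs_08/Lab3/num3.py | separate_positive_negative
-- ===== SOURCE A (Python) =====
-- def separate_positive_negative(L):
--     L1 = []  # Список для положительных элементов
--     L2 = []  # Список для отрицательных элементов
--
--     for element in L:
--         if element > 0:
--             L1.append(element)  # Добавляем положительный элемент в L1
--         elif element == 0:
--             L1.append(element) # Я считаю, что 0 это положительный элемент
--         elif element < 0:
--             L2.append(element)  # Добавляем отрицательный элемент в L2
--
--     # Добавим сортировочку, чтоб было красивее
--     L1.sort()
--     L2.sort()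
--
--     return L1, L2
-- ===== SOURCE B (Python) =====
-- def separate_positive_negative(L):
--     # Sort once, then split the globally sorted list: negatives are a prefix.
--     S = sorted(L)
--     i = 0
--     for x in S:
--         if x < 0:
--             i += 1
--         else:
--             break
--     return S[i:], S[:i]
-- ===== Notes on version B (the rewrite author's own statement) =====
-- stated objective: alternative
-- what changed: A partitions first and then sorts each of the two lists; B sorts the whole list once and splits the sorted result at the boundary between negatives and nonnegatives, so no per-list sort is needed.
import Mathlib
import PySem

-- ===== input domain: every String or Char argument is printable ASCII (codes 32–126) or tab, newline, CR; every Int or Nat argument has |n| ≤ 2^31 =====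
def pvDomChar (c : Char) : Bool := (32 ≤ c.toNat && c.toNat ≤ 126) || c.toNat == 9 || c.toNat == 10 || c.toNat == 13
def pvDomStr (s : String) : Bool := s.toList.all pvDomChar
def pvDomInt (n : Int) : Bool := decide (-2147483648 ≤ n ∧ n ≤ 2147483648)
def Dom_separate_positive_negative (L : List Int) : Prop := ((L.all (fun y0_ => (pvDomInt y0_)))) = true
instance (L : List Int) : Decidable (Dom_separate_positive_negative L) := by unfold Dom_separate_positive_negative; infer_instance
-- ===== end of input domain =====

-- B sorts the list once and splits the sorted result at the negative/nonnegative
-- boundary, instead of A's partition-then-sort-each; same return value, proved equal.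


-- ===== PORT A =====
def separate_positive_negative (L : List Int) : List Int × List Int :=
  let r := L.foldl (fun (acc : List Int × List Int) element =>
    if element > 0 then (acc.1 ++ [element], acc.2)
    else if element = 0 then (acc.1 ++ [element], acc.2)
    else if element < 0 then (acc.1, acc.2 ++ [element])
    else acc) ([], [])
  (PySem.List.sorted r.1 (fun x => x) false, PySem.List.sorted r.2 (fun x => x) false)

-- ===== PORT B =====
-- the 'for x in S: if x < 0: i += 1 else: break' counter
def pvCountNegPrefix : List Int → Nat
  | [] => 0
  | x :: t => if x < 0 then pvCountNegPrefix t + 1 else 0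

def separate_positive_negative_alt (L : List Int) : List Int × List Int :=
  let S := PySem.List.sorted L (fun x => x) false
  let i := pvCountNegPrefix S
  -- S[i:], S[:i] with 0 ≤ i ≤ len S are exactly drop/take
  (S.drop i, S.take i)

-- ===== PRECONDITION & SPEC =====
def Spec_separate_positive_negative (L : List Int) (out : List Int × List Int) : Prop := out = separate_positive_negative_alt L
instance (L : List Int) (out : List Int × List Int) : Decidable (Spec_separate_positive_negative L out) := by unfold Spec_separate_positive_negative; infer_instance

-- ===== CLAIM (what is proved, stated in full; the proofs are below) =====
def Claim_equal_separate_positive_negative : Prop := ∀ (L : List Int), Dom_separate_positive_negative L → Spec_separate_positive_negative L (separate_positive_negative L)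

-- ===== LEMMAS AND PROOFS =====

-- A's loop accumulates exactly (nonnegatives of L, negatives of L) in order
theorem pvFoldA (L : List Int) (a b : List Int) :
    L.foldl (fun (acc : List Int × List Int) element =>
      if element > 0 then (acc.1 ++ [element], acc.2)
      else if element = 0 then (acc.1 ++ [element], acc.2)
      else if element < 0 then (acc.1, acc.2 ++ [element])
      else acc) (a, b)
    = (a ++ L.filter (fun x => decide (0 ≤ x)), b ++ L.filter (fun x => decide (x < 0))) := by
  induction L generalizing a b with
  | nil => simp
  | cons x t ih =>
    rcases lt_trichotomy x 0 with h | h | h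
    · simp only [List.foldl_cons, List.filter_cons]
      rw [if_neg (by omega), if_neg (by omega), if_pos h, ih]
      simp [h, show ¬ (0 ≤ x) by omega]
    · subst h
      simp only [List.foldl_cons, List.filter_cons]
      norm_num
      rw [ih]
      simp
    · simp only [List.foldl_cons, List.filter_cons]
      rw [if_pos h, ih]
      simp [show (0:Int) ≤ x by omega, show ¬ (x < 0) by omega]

-- on a ≤-sorted list, take/drop at the negative-prefix count are the two filters
theorem pvSplitSorted (S : List Int) (hp : S.Pairwise (· ≤ ·)) :
    S.take (pvCountNegPrefix S) = S.filter (fun x => decide (x < 0)) ∧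
    S.drop (pvCountNegPrefix S) = S.filter (fun x => decide (0 ≤ x)) := by
  induction S with
  | nil => simp [pvCountNegPrefix]
  | cons x t ih =>
    rcases List.pairwise_cons.mp hp with ⟨hx, ht⟩
    rcases ih ht with ⟨ih1, ih2⟩
    by_cases h : x < 0
    · simp only [pvCountNegPrefix, if_pos h, List.filter_cons]
      constructor
      · simpa [h] using ih1
      · simpa [show ¬ (0 ≤ x) by omega] using ih2
    · have hx0 : (0:Int) ≤ x := by omega
      have hall : ∀ y ∈ t, (0:Int) ≤ y := fun y hy => le_trans hx0 (hx y hy)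
      simp only [pvCountNegPrefix, if_neg h, List.take_zero, List.drop_zero,
        List.filter_cons]
      constructor
      · have : t.filter (fun x => decide (x < 0)) = [] := by
          rw [List.filter_eq_nil_iff]
          intro y hy
          simp [show ¬ (y < 0) by have := hall y hy; omega]
        simp [h, this]
      · have : t.filter (fun x => decide (0 ≤ x)) = t := by
          rw [List.filter_eq_self]
          intro y hy
          simp [hall y hy]
        simp [hx0, this]

-- sorting a filtered list = filtering the sorted list
theorem pvSortedFilter (L : List Int) (p : Int → Bool) :
    PySem.List.sorted (L.filter p) (fun x => x) false
      = (PySem.List.sorted L (fun x => x) false).filter p := by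
  apply PySem.List.sorted_id_eq_of_perm_of_pairwise
  · exact (PySem.List.sorted_perm L (fun x => x) false).filter p
  · exact List.Pairwise.sublist List.filter_sublist
      (PySem.List.sorted_pairwise L (fun x => x))

-- ===== VERDICT (by name: the statement is the Claim_ definition above) =====
theorem separate_positive_negative_spec : Claim_equal_separate_positive_negative := by
  intro L _
  show _ = _
  unfold separate_positive_negative separate_positive_negative_alt
  rw [pvFoldA L [] []]
  rcases pvSplitSorted (PySem.List.sorted L (fun x => x) false)
    (PySem.List.sorted_pairwise L (fun x => x)) with ⟨h1, h2⟩
  simp only [List.nil_append, pvSortedFilter, h1, h2]
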